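-- pv_equiv track=rewrite | github.com/RaiderTcT/study | interview/interview_2.py | rope
-- ===== SOURCE A (Python) =====
-- def rope(array, rope_len):
--     max_res = 1
--     n = len(array)
--     distance = [array[i+1] - array[i] for i in range(n-1)]
--     index = 0
--     for i in range(n-1):
--         templen = 0
--         j = 0
--         temp = 0
--         while templen <= rope_len and j < n-1-i:
--             temp += 1
--             templen += distance[i+j]
--             j += 1
--         if temp > max_res:
--             max_res = temp
--             index = i
--     return max_res, index
-- ===== SOURCE B (Python) =====
-- def _build(a, lo, hi):
--     # max segment tree over a[lo:hi]; leaf = (value,), node = (max, left, right)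
--     if hi - lo == 1:
--         return (a[lo],)
--     mid = (lo + hi) // 2
--     l = _build(a, lo, mid)
--     r = _build(a, mid, hi)
--     return (l[0] if l[0] >= r[0] else r[0], l, r)
--
-- def _first_over(t, lo, hi, i, x):
--     # first index k with i <= k < hi and a[k] > x, or None
--     if i >= hi or t[0] <= x:
--         return None
--     if len(t) == 1:
--         return lo
--     mid = (lo + hi) // 2
--     res = _first_over(t[1], lo, mid, i, x)
--     return res if res is not None else _first_over(t[2], mid, hi, i, x)
--
-- def rope(array, rope_len):
--     n = len(array)
--     m = n - 1
--     if m <= 0: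
--         return 1, 0
--     tree = _build(array, 0, m)
--     best, idx = 1, 0
--     for i in range(m):
--         k = _first_over(tree, 0, m, i, array[i] + rope_len)
--         temp = (k if k is not None else m) - i
--         if temp > best:
--             best, idx = temp, i
--     return best, idx
-- ===== Notes on version B (the rewrite author's own statement) =====
-- stated objective: faster
-- what changed: B drops A's distance array and per-start while-loop over gap sums and instead builds a max segment tree once, answering 'first position whose value exceeds array[i]+rope_len' for each start i by tree descent.
import Mathlib
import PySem

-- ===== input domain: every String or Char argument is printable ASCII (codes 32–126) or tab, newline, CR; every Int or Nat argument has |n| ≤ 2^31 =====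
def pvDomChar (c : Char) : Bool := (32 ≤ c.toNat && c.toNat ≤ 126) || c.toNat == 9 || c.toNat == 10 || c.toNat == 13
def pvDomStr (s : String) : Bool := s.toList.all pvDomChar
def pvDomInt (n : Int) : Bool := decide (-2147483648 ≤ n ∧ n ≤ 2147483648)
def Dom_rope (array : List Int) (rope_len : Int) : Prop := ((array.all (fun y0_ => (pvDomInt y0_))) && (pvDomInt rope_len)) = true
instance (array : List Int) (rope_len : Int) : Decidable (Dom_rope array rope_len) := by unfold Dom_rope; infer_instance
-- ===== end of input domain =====

-- B replaces A's per-start gap-sum rescans by a max-segment-tree "first index with value above threshold"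
-- descent, a genuinely different algorithm; both return the same (count, start index) pair.

-- ===== PORT A =====
-- A's inner `while templen <= rope_len and j < n-1-i:` loop with state (templen, j, temp)
def ropeWhile (distance : List Int) (rope_len : Int) (i bound j : Nat) (templen temp : Int) : Int :=
  if templen ≤ rope_len ∧ j < bound then
    ropeWhile distance rope_len i bound (j+1) (templen + distance.getD (i+j) 0) (temp + 1)
  else temp
termination_by bound - j

def rope (array : List Int) (rope_len : Int) : Int × Int :=
  let n := array.length
  let distance := (List.range (n-1)).map (fun i => array.getD (i+1) 0 - array.getD i 0)
  (List.range (n-1)).foldl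
    (fun (st : Int × Int) i =>
      let temp := ropeWhile distance rope_len i (n-1-i) 0 0 0
      if temp > st.1 then (temp, (i : Int)) else st)
    (1, 0)

-- ===== PORT B =====
-- Source B: leaf = (value,), node = (max, left, right)
inductive STree where
  | leaf : Int → STree
  | node : Int → STree → STree → STree
deriving Repr

def STree.maxv : STree → Int
  | .leaf v => v
  | .node v _ _ => v

-- Source B _build: max segment tree over a[lo:hi]
def buildT (a : List Int) (lo hi : Nat) : STree :=
  if h : hi - lo ≤ 1 then .leaf (a.getD lo 0)
  else
    let mid := (lo + hi) / 2
    let l := buildT a lo mid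
    let r := buildT a mid hi
    .node (if l.maxv ≥ r.maxv then l.maxv else r.maxv) l r
termination_by hi - lo
decreasing_by all_goals omega

-- Source B _first_over: first index k with i <= k < hi and a[k] > x, else none
def firstOver (t : STree) (lo hi i : Nat) (x : Int) : Option Nat :=
  if hi ≤ i ∨ t.maxv ≤ x then none
  else match t with
    | .leaf _ => some lo
    | .node _ l r =>
        match firstOver l lo ((lo + hi) / 2) i x with
        | some k => some k
        | none => firstOver r ((lo + hi) / 2) hi i x

def rope_alt (array : List Int) (rope_len : Int) : Int × Int :=
  let n := array.length
  let m := n - 1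
  if m = 0 then (1, 0)
  else
    let t := buildT array 0 m
    (List.range m).foldl
      (fun (st : Int × Int) i =>
        let temp : Int :=
          match firstOver t 0 m i (array.getD i 0 + rope_len) with
          | some k => (k : Int) - (i : Int)
          | none => (m : Int) - (i : Int)
        if temp > st.1 then (temp, (i : Int)) else st)
      (1, 0)

-- ===== PRECONDITION & SPEC =====
def Spec_rope (array : List Int) (rope_len : Int) (out : Int × Int) : Prop := out = rope_alt array rope_len
instance (array : List Int) (rope_len : Int) (out : Int × Int) : Decidable (Spec_rope array rope_len out) := by unfold Spec_rope; infer_instance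

-- ===== CLAIM (what is proved, stated in full; the proofs are below) =====
def Claim_equal_rope : Prop := ∀ (array : List Int) (rope_len : Int), Dom_rope array rope_len → Spec_rope array rope_len (rope array rope_len)

-- ===== LEMMAS AND PROOFS =====
-- fo a x s len = first k in [s, s+len) with x < a.getD k 0: the common specification
-- of A's inner while loop and B's segment-tree descent
def fo (a : List Int) (x : Int) (s len : Nat) : Option Nat :=
  (List.range' s len).find? (fun k => decide (x < a.getD k 0))

lemma maxv_node (v : Int) (l r : STree) : (STree.node v l r).maxv = v := rfl

lemma maxv_leaf (v : Int) : (STree.leaf v).maxv = v := rfl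

lemma fo_zero (a : List Int) (x : Int) (s : Nat) : fo a x s 0 = none := rfl

lemma fo_split (a : List Int) (x : Int) (s m n : Nat) :
    fo a x s (m + n) = (fo a x s m).or (fo a x (s + m) n) := by
  unfold fo
  rw [← List.range'_append, List.find?_append]
  simp

lemma fo_some_bounds {a : List Int} {x : Int} {s len k : Nat}
    (h : fo a x s len = some k) : s ≤ k ∧ k < s + len := by
  have hm := List.mem_of_find?_eq_some h
  obtain ⟨j, hj, rfl⟩ := List.mem_range'.mp hm
  omega

lemma maxv_buildT (a : List Int) : ∀ d lo hi k, hi - lo ≤ d → lo < hi → lo ≤ k → k < hi →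
    a.getD k 0 ≤ (buildT a lo hi).maxv := by
  intro d
  induction d with
  | zero => intro lo hi k hd h1; omega
  | succ d ih =>
    intro lo hi k hd h1 h2 h3
    rw [buildT]
    by_cases hle : hi - lo ≤ 1
    · rw [dif_pos hle]
      have : k = lo := by omega
      subst this; rw [maxv_leaf]
    · rw [dif_neg hle]
      rw [maxv_node]
      have h1' : lo < (lo + hi) / 2 := by omega
      have h2' : (lo + hi) / 2 < hi := by omega
      by_cases hk : k < (lo + hi) / 2
      · have hl := ih lo ((lo+hi)/2) k (by omega) h1' h2 hk
        split_ifs with hcmp <;> omega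
      · have hr := ih ((lo+hi)/2) hi k (by omega) h2' (by omega) h3
        split_ifs with hcmp <;> omega

lemma fo_prune (a : List Int) (x : Int) (lo hi s len : Nat)
    (hlo : lo ≤ s) (hhi : s + len ≤ hi) (h1 : lo < hi)
    (hmax : (buildT a lo hi).maxv ≤ x) : fo a x s len = none := by
  unfold fo
  rw [List.find?_eq_none]
  intro k hk
  have hb := List.mem_range'.mp hk
  obtain ⟨j, hj, rfl⟩ := hb
  have := maxv_buildT a (hi - lo) lo hi (s + 1 * j) (by omega) h1 (by omega) (by omega)
  simp only [decide_eq_true_eq]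
  omega

lemma firstOver_buildT (a : List Int) : ∀ d lo hi i x, hi - lo ≤ d → lo < hi →
    firstOver (buildT a lo hi) lo hi i x = fo a x (max lo i) (hi - max lo i) := by
  intro d
  induction d with
  | zero => intro lo hi i x hd h1; omega
  | succ d ih =>
    intro lo hi i x hd h1
    by_cases hgi : hi ≤ i
    · rw [firstOver.eq_def, if_pos (Or.inl hgi)]
      have : hi - max lo i = 0 := by omega
      rw [this, fo_zero]
    · by_cases hgx : (buildT a lo hi).maxv ≤ x
      · rw [firstOver.eq_def, if_pos (Or.inr hgx)]
        rw [fo_prune a x lo hi (max lo i) (hi - max lo i) (by omega) (by omega) h1 hgx]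
      · rw [buildT] at hgx ⊢
        by_cases hle : hi - lo ≤ 1
        · rw [dif_pos hle] at hgx ⊢
          rw [firstOver.eq_def]
          simp only [if_neg (show ¬(hi ≤ i ∨ (STree.leaf (a.getD lo 0)).maxv ≤ x) by rw [maxv_leaf] at hgx ⊢; push Not; exact ⟨by omega, by omega⟩)]
          have hmax : max lo i = lo := by omega
          have hlen : hi - max lo i = 1 := by omega
          rw [hmax] at hlen ⊢
          rw [hlen]
          unfold fo
          simp only [List.range'_one, List.find?_singleton]
          rw [maxv_leaf] at hgx
          rw [if_pos (by simp only [decide_eq_true_eq]; omega)]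
        · rw [dif_neg hle] at hgx ⊢
          rw [firstOver.eq_def]
          simp only [if_neg (show ¬(hi ≤ i ∨ (STree.node (if (buildT a lo ((lo+hi)/2)).maxv ≥ (buildT a ((lo+hi)/2) hi).maxv then (buildT a lo ((lo+hi)/2)).maxv else (buildT a ((lo+hi)/2) hi).maxv) (buildT a lo ((lo+hi)/2)) (buildT a ((lo+hi)/2) hi)).maxv ≤ x) by rw [maxv_node] at hgx ⊢; push Not; exact ⟨by omega, by omega⟩)]
          have h1l : lo < (lo + hi) / 2 := by omega
          have h1r : (lo + hi) / 2 < hi := by omega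
          rw [ih lo ((lo + hi) / 2) i x (by omega) h1l,
              ih ((lo + hi) / 2) hi i x (by omega) h1r]
          by_cases hcase : i ≤ (lo + hi) / 2
          · have hmr : max ((lo + hi) / 2) i = (lo + hi) / 2 := by omega
            rw [hmr]
            have hsplit : hi - max lo i = ((lo + hi) / 2 - max lo i) + (hi - (lo + hi) / 2) := by omega
            rw [hsplit, fo_split]
            have : max lo i + ((lo + hi) / 2 - max lo i) = (lo + hi) / 2 := by omega
            rw [this]
            cases fo a x (max lo i) ((lo + hi) / 2 - max lo i) <;> simp
          · have hml : max lo i = i := by omega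
            have hmr : max ((lo + hi) / 2) i = i := by omega
            rw [hml, hmr]
            have h0 : (lo + hi) / 2 - i = 0 := by omega
            rw [h0, fo_zero]

lemma distGetD (a : List Int) (k : Nat) (hk : k < a.length - 1) :
    ((List.range (a.length - 1)).map (fun i => a.getD (i+1) 0 - a.getD i 0)).getD k 0
      = a.getD (k+1) 0 - a.getD k 0 := by
  simp [List.getD_eq_getElem?_getD, hk]

lemma ropeWhile_eq (a : List Int) (L : Int) (i bound : Nat)
    (hb : i + bound ≤ a.length - 1) :
    ∀ fuel j (tp : Int), fuel = bound - j → j ≤ bound →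
      ropeWhile ((List.range (a.length - 1)).map (fun i => a.getD (i+1) 0 - a.getD i 0))
        L i bound j (a.getD (i+j) 0 - a.getD i 0) tp
      = tp + (match fo a (a.getD i 0 + L) (i+j) (bound - j) with
              | some k => ((k - (i+j) : Nat) : Int)
              | none => ((bound - j : Nat) : Int)) := by
  intro fuel
  induction fuel with
  | zero =>
    intro j tp hf hj
    rw [ropeWhile, if_neg (by omega)]
    rw [show bound - j = 0 by omega, fo_zero]
    simp
  | succ fuel ih =>
    intro j tp hf hj
    have hjlt : j < bound := by omega
    have hcons : bound - j = (bound - (j+1)) + 1 := by omega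
    rw [ropeWhile]
    by_cases hp : a.getD (i+j) 0 - a.getD i 0 ≤ L
    · rw [if_pos ⟨hp, hjlt⟩]
      have hstep : a.getD (i+j) 0 - a.getD i 0
            + ((List.range (a.length - 1)).map (fun i => a.getD (i+1) 0 - a.getD i 0)).getD (i+j) 0
          = a.getD (i+j+1) 0 - a.getD i 0 := by
        rw [distGetD a (i+j) (by omega)]; ring
      rw [hstep]
      have hih := ih (j+1) (tp+1) (by omega) (by omega)
      rw [show i + (j+1) = i+j+1 from rfl] at hih
      rw [hih, hcons]
      unfold fo
      rw [List.range'_succ, List.find?_cons_of_neg (by simp only [decide_eq_true_eq]; omega)]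
      have hfo : (List.range' (i+j+1) (bound - (j+1))).find? (fun k => decide (a.getD i 0 + L < a.getD k 0))
          = fo a (a.getD i 0 + L) (i+j+1) (bound - (j+1)) := rfl
      rw [hfo]
      cases hc : fo a (a.getD i 0 + L) (i+j+1) (bound - (j+1)) with
      | none =>
        exact (by omega : (tp + 1 + ((bound - (j+1) : Nat) : Int)) = tp + ((bound - (j+1) + 1 : Nat) : Int))
      | some k =>
        have hkb := fo_some_bounds hc
        exact (by omega : (tp + 1 + ((k - (i+j+1) : Nat) : Int)) = tp + ((k - (i+j) : Nat) : Int))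
    · rw [if_neg (by tauto)]
      rw [hcons]
      unfold fo
      rw [List.range'_succ, List.find?_cons_of_pos (by simp only [decide_eq_true_eq]; omega)]
      simp

theorem rope_eq_alt (a : List Int) (L : Int) : rope a L = rope_alt a L := by
  by_cases hm : a.length - 1 = 0
  · simp only [rope, rope_alt, hm]
    simp
  · simp only [rope, rope_alt, if_neg hm]
    apply PySem.List.foldl_congr_mem
    intro st i hi
    have him : i < a.length - 1 := List.mem_range.mp hi
    have htemp : ropeWhile ((List.range (a.length-1)).map (fun i => a.getD (i+1) 0 - a.getD i 0))
          L i (a.length-1-i) 0 0 0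
        = (match firstOver (buildT a 0 (a.length-1)) 0 (a.length-1) i (a.getD i 0 + L) with
           | some k => ((k : Int) - (i : Int))
           | none => (((a.length-1 : Nat)) : Int) - (i : Int)) := by
      have h := ropeWhile_eq a L i (a.length-1-i) (by omega) (a.length-1-i) 0 0 rfl (Nat.zero_le _)
      simp only [Nat.add_zero, sub_self, Nat.sub_zero, zero_add] at h
      rw [h]
      rw [firstOver_buildT a (a.length-1) 0 (a.length-1) i (a.getD i 0 + L) (Nat.le_refl _) (by omega)]
      rw [Nat.zero_max]
      cases hc : fo a (a.getD i 0 + L) i (a.length-1-i) with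
      | none => exact (by omega : ((a.length-1-i : Nat) : Int) = ((a.length-1 : Nat) : Int) - (i:Int))
      | some k =>
        have hkb := fo_some_bounds hc
        exact (by omega : ((k - i : Nat) : Int) = (k : Int) - (i : Int))
    rw [htemp]

-- ===== VERDICT (by name: the statement is the Claim_ definition above) =====
theorem rope_spec : Claim_equal_rope := by
  intro array rope_len _
  unfold Spec_rope
  exact rope_eq_alt array rope_len
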